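-- pv_equiv track=rewrite | github.com/aolsen07/advent-of-code-2025 | problems/lobby.py | largest_possible_joltage
-- ===== SOURCE A (Python) =====
-- def largest_possible_joltage(bank):
--
--     # 2 pointers and joltage formula
--     i = 0
--     j = 1
--     result = bank[0] * 10 + bank[1]
--
--     # order matters
--     for i in range(len(bank) - 1):
--         for j in range(i + 1, len(bank)):
--             result = max((bank[i] * 10) + bank[j], result)
--
--     return result
-- ===== SOURCE B (Python) =====
-- def largest_possible_joltage(bank):
--     # single right-to-left pass: for each i, the best partner j>i is the suffix maximum
--     suf = bank[-1]
--     best = bank[-2] * 10 + suf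
--     suf = max(suf, bank[-2])
--     for x in reversed(bank[:-2]):
--         best = max(best, x * 10 + suf)
--         suf = max(suf, x)
--     return best
-- ===== Notes on version B (the rewrite author's own statement) =====
-- stated objective: faster
-- what changed: replaced the O(n^2) double loop over all pairs (i,j) by a single right-to-left pass that maintains the running suffix maximum, since for each i the best partner j>i is the maximum element to its right
import Mathlib
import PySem

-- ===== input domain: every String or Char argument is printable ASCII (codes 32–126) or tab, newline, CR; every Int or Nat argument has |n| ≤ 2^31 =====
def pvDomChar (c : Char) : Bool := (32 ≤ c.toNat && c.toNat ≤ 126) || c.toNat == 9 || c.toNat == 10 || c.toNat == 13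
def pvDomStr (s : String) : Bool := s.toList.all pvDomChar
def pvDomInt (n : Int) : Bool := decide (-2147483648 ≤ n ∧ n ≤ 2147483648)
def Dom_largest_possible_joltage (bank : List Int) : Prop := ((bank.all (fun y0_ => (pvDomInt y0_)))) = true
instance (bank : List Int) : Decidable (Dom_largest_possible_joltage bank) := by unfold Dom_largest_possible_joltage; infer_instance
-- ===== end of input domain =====

-- B replaces A's O(n^2) double loop over pairs by one right-to-left pass with a suffix maximum (faster, asymptotic).


-- ===== PORT A =====
-- literal port of A: result = bank[0]*10 + bank[1]; double index loop taking max of bank[i]*10 + bank[j]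
def largest_possible_joltage (bank : List Int) : Int :=
  let result : Int := PySem.List.pyGetD bank 0 0 * 10 + PySem.List.pyGetD bank 1 0
  (PySem.List.pyRange 0 ((bank.length : Int) - 1) 1).foldl
    (fun result i =>
      (PySem.List.pyRange (i + 1) (bank.length : Int) 1).foldl
        (fun result j =>
          max (PySem.List.pyGetD bank i 0 * 10 + PySem.List.pyGetD bank j 0) result)
        result)
    result

-- ===== PORT B =====
-- literal port of B: suf = bank[-1]; best = bank[-2]*10 + suf; suf = max(suf, bank[-2]);
-- for x in reversed(bank[:-2]): best = max(best, x*10 + suf); suf = max(suf, x); return best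
def largest_possible_joltage_alt (bank : List Int) : Int :=
  let suf : Int := PySem.List.pyGetD bank (-1) 0
  let best : Int := PySem.List.pyGetD bank (-2) 0 * 10 + suf
  let suf : Int := max suf (PySem.List.pyGetD bank (-2) 0)
  let st := ((PySem.List.slice bank none (some (-2))).reverse).foldl
    (fun (st : Int × Int) x => (max st.1 (x * 10 + st.2), max st.2 x)) (best, suf)
  st.1

-- ===== PRECONDITION & SPEC =====
-- A raises IndexError on lists of length < 2 (bank[0]/bank[1]); B raises there too (bank[-2]).
def Pre_largest_possible_joltage (bank : List Int) : Prop := 2 ≤ bank.length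
instance (bank : List Int) : Decidable (Pre_largest_possible_joltage bank) := by
  unfold Pre_largest_possible_joltage; infer_instance

def pvWitness_largest_possible_joltage : List Int := [3, 5, 2]

def Spec_largest_possible_joltage (bank : List Int) (out : Int) : Prop := out = largest_possible_joltage_alt bank
instance (bank : List Int) (out : Int) : Decidable (Spec_largest_possible_joltage bank out) := by unfold Spec_largest_possible_joltage; infer_instance

-- ===== CLAIM (what is proved, stated in full; the proofs are below) =====
def Claim_equal_largest_possible_joltage : Prop := ∀ (bank : List Int), Dom_largest_possible_joltage bank → Pre_largest_possible_joltage bank → Spec_largest_possible_joltage bank (largest_possible_joltage bank)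

-- ===== LEMMAS AND PROOFS =====

-- the multiset of candidate pair values bank[i]*10 + bank[j], i < j
def cands : List Int → List Int
  | [] => []
  | x :: xs => xs.map (fun y => x * 10 + y) ++ cands xs

-- one step of B's scan, and B's whole scan as a foldr over the front list
def pvStep (st : Int × Int) (x : Int) : Int × Int := (max st.1 (x * 10 + st.2), max st.2 x)
def pvF (xs : List Int) (init : Int × Int) : Int × Int := xs.foldr (fun x st => pvStep st x) init

lemma foldr_max_init (l : List Int) (a b : Int) :
    l.foldr max (max a b) = max a (l.foldr max b) := by
  induction l with
  | nil => rfl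
  | cons x l ih => simp only [List.foldr_cons, ih]; omega

lemma fold_max_eq (l : List Int) (a : Int) :
    l.foldl (fun r y => max y r) a = l.foldr max a := by
  induction l generalizing a with
  | nil => rfl
  | cons x l ih => simp only [List.foldl_cons, List.foldr_cons]; rw [ih, foldr_max_init]

lemma cands_short (l : List Int) (h : l.length ≤ 1) : cands l = [] := by
  match l with
  | [] => rfl
  | [x] => rfl
  | x :: y :: t => simp at h

lemma map_add_foldr_max (l : List Int) (c y b : Int) :
    (((y :: l).map (fun z => c * 10 + z)).foldr max b) = max b (c * 10 + l.foldr max y) := by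
  induction l generalizing y b with
  | nil => simp; omega
  | cons z l ih =>
      have e : max y (l.foldr max z) = max z (l.foldr max y) := by
        rw [← foldr_max_init, ← foldr_max_init, max_comm]
      simp only [List.map_cons, List.foldr_cons] at *
      rw [ih]
      omega

lemma pvF_snd (xs : List Int) (b s : Int) :
    (pvF xs (b, s)).2 = xs.foldr max s := by
  induction xs with
  | nil => rfl
  | cons x xs ih => simp only [pvF, List.foldr_cons, pvStep] at *; rw [ih]; omega

lemma pvF_maxinit (xs : List Int) (b c s : Int) :
    (pvF xs (max b c, s)).1 = max ((pvF xs (b, s)).1) c := by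
  induction xs with
  | nil => rfl
  | cons x xs ih =>
      simp only [pvF, List.foldr_cons, pvStep] at *
      rw [ih]
      have h2 : ∀ b' : Int, (pvF xs (b', s)).2 = xs.foldr max s := fun b' => pvF_snd xs b' s
      simp only [pvF, pvStep] at h2
      rw [h2, h2]
      omega

-- the max of all candidates of xs ++ [p, q] is what B's scan computes
lemma key (xs : List Int) (p q a : Int) :
    (cands (xs ++ [p, q])).foldr max a = (pvF xs (max (p * 10 + q) a, max q p)).1 := by
  induction xs generalizing a with
  | nil => simp [cands, pvF]
  | cons x xs ih =>
      simp only [List.cons_append, cands, List.foldr_append, ih]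
      cases xs with
      | nil =>
          simp only [List.nil_append, pvF, List.foldr_cons, List.foldr_nil, pvStep,
            List.map_cons, List.map_nil]
          simp; omega
      | cons y xs' =>
          rw [List.cons_append, map_add_foldr_max]
          have hs : (xs' ++ [p, q]).foldr max y = (y :: xs').foldr max (max q p) := by
            simp only [List.foldr_append, List.foldr_cons, List.foldr_nil]
            have : max p (max q y) = max y (max q p) := by omega
            rw [this, foldr_max_init]
          rw [hs]
          simp only [pvF, List.foldr_cons, pvStep]
          have h2 := pvF_snd xs' (max (p * 10 + q) a) (max q p)
          simp only [pvF, pvStep] at h2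
          rw [h2]
          omega

-- A's double index loop computes the foldl-max of the candidates of bank.drop k
lemma a_fold (bank : List Int) (m : Nat) : ∀ (k : Nat) (a : Int), bank.length - k = m →
    (PySem.List.pyRange (k : Int) ((bank.length : Int) - 1) 1).foldl
      (fun r i =>
        (PySem.List.pyRange (i + 1) (bank.length : Int) 1).foldl
          (fun r2 j =>
            max (PySem.List.pyGetD bank i 0 * 10 + PySem.List.pyGetD bank j 0) r2)
          r)
      a
    = (cands (bank.drop k)).foldl (fun r y => max y r) a := by
  induction m with
  | zero =>
      intro k a hm
      rw [PySem.List.pyRange_one_eq_nil (by omega), cands_short _ (by simp; omega)]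
      rfl
  | succ m ih =>
      intro k a hm
      by_cases hk : k + 1 < bank.length
      · have hkl : k < bank.length := by omega
        rw [PySem.List.pyRange_one_cons (by omega), List.foldl_cons]
        have hcast : (k : Int) + 1 = ((k + 1 : Nat) : Int) := by push_cast; ring
        rw [hcast,
          PySem.List.foldl_pyRange_pyGetD' bank 0
            (fun r2 y => max (PySem.List.pyGetD bank (k : Int) 0 * 10 + y) r2) a
            (Int.natCast_nonneg (k + 1))]
        rw [ih (k + 1) _ (by omega)]
        have hdrop : bank.drop k = bank[k] :: bank.drop (k + 1) :=
          List.drop_eq_getElem_cons hkl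
        rw [hdrop]
        simp only [cands, List.foldl_append, List.foldl_map, Int.toNat_natCast]
        rw [PySem.List.pyGetD_natCast, List.getD_eq_getElem _ _ hkl]
      · rw [PySem.List.pyRange_one_eq_nil (by omega),
          cands_short _ (by simp; omega)]
        rfl

lemma exists_append_pair (l : List Int) (h : 2 ≤ l.length) :
    ∃ xs p q, l = xs ++ [p, q] := by
  match hr : l.reverse with
  | [] => rw [← l.length_reverse, hr] at h; simp at h
  | [x] => rw [← l.length_reverse, hr] at h; simp at h
  | q :: p :: ys =>
      exact ⟨ys.reverse, p, q, by rw [← List.reverse_reverse l, hr]; simp⟩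

-- ===== VERDICT (by name: the statement is the Claim_ definition above) =====
theorem largest_possible_joltage_spec : Claim_equal_largest_possible_joltage := by
  intro bank _ hpre
  unfold Pre_largest_possible_joltage at hpre
  obtain ⟨xs, p, q, rfl⟩ := exists_append_pair bank hpre
  unfold Spec_largest_possible_joltage largest_possible_joltage largest_possible_joltage_alt
  dsimp only
  -- B's side: reduce the port to (pvF xs (p*10+q, max q p)).1
  have hq : PySem.List.pyGetD (xs ++ [p, q]) (-1) 0 = q := by
    have : xs ++ [p, q] = (xs ++ [p]) ++ [q] := by simp
    rw [this, PySem.List.pyGetD_neg_one_append_singleton]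
  have hp : PySem.List.pyGetD (xs ++ [p, q]) (-2) 0 = p := by
    rw [PySem.List.pyGetD_neg_ofNat _ 2 0 (by omega) (by simp)]
    simp
  have hslice : PySem.List.slice (xs ++ [p, q]) none (some (-2)) = xs := by
    rw [PySem.List.slice_to_neg_ofNat _ 2 (by omega)]
    have : (xs ++ [p, q]).length - 2 = xs.length := by simp
    rw [this, List.take_left]
  rw [hq, hp, hslice, List.foldl_reverse]
  -- A's side: the double loop is the fold of max over all candidates
  have hA := a_fold (xs ++ [p, q]) ((xs ++ [p, q]).length) 0
    (PySem.List.pyGetD (xs ++ [p, q]) 0 0 * 10 + PySem.List.pyGetD (xs ++ [p, q]) 1 0) (by omega)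
  rw [Nat.cast_zero] at hA
  rw [hA, List.drop_zero, fold_max_eq, key, pvF_maxinit]
  -- the initial value bank[0]*10 + bank[1] never exceeds the scan's result
  have hc0 : PySem.List.pyGetD (xs ++ [p, q]) 0 0 * 10 + PySem.List.pyGetD (xs ++ [p, q]) 1 0
      ≤ (pvF xs (p * 10 + q, max q p)).1 := by
    cases xs with
    | nil => simp [PySem.List.pyGetD_ofNat', pvF]
    | cons x0 xs' =>
        have h0 : PySem.List.pyGetD ((x0 :: xs') ++ [p, q]) 0 0 = x0 := by
          rw [PySem.List.pyGetD_zero]; rfl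
        have h1 : PySem.List.pyGetD ((x0 :: xs') ++ [p, q]) 1 0 = (xs' ++ [p, q]).getD 0 0 := by
          rw [PySem.List.pyGetD_ofNat' _ 1 0]; rfl
        have hsnd := pvF_snd xs' (p * 10 + q) (max q p)
        have hle : (xs' ++ [p, q]).getD 0 0 ≤ xs'.foldr max (max q p) := by
          cases xs' with
          | nil => simp
          | cons y ys => simp only [List.cons_append, List.getD_cons_zero, List.foldr_cons]; omega
        simp only [pvF, pvStep, List.foldr_cons] at hsnd ⊢
        rw [h0, h1, hsnd]
        omega
  simp only [pvF, pvStep] at hc0 ⊢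
  omega
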